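-- pv_equiv track=rewrite | github.com/YoussefTrabelsi1/Leetcode_solutions | Python/Maximum Matrix Sum/space_optimized.py | maximumMatrixSum
-- ===== SOURCE A (Python) =====
-- from typing import List
--
-- def maximumMatrixSum(matrix: List[List[int]]) -> int:
--     total_abs = 0
--     min_abs = 10**18
--     neg_count = 0
--     has_zero = False
--
--     for row in matrix:
--         for x in row:
--             if x == 0:
--                 has_zero = True
--             if x < 0:
--                 neg_count += 1
--             ax = -x if x < 0 else x
--             total_abs += ax
--             if ax < min_abs:
--                 min_abs = ax
--
--     if has_zero:
--         return total_abs
--     if neg_count % 2 == 0: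
--         return total_abs
--     return total_abs - 2 * min_abs
-- ===== SOURCE B (Python) =====
-- from typing import List
--
-- def maximumMatrixSum(matrix: List[List[int]]) -> int:
--     # Dynamic programming over sign choices: 'even' / 'odd' hold the best
--     # achievable sum using an even / odd number of sign flips so far.
--     # Since flips come in pairs, the answer is the even-parity optimum.
--     even, odd = 0, None
--     for row in matrix:
--         for x in row:
--             if odd is None:
--                 even, odd = even + x, even - x
--             else:
--                 even, odd = max(even + x, odd - x), max(even - x, odd + x)
--     return even
-- ===== Notes on version B (the rewrite author's own statement) =====
-- stated objective: alternative
-- what changed: Replaces A's sum-of-absolutes / negative-count / min-abs arithmetic with a two-state dynamic program over sign choices: 'even' and 'odd' track the best sum achievable with an even/odd number of flips so far, updated per element, and the even-parity optimum is returned.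
import Mathlib
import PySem

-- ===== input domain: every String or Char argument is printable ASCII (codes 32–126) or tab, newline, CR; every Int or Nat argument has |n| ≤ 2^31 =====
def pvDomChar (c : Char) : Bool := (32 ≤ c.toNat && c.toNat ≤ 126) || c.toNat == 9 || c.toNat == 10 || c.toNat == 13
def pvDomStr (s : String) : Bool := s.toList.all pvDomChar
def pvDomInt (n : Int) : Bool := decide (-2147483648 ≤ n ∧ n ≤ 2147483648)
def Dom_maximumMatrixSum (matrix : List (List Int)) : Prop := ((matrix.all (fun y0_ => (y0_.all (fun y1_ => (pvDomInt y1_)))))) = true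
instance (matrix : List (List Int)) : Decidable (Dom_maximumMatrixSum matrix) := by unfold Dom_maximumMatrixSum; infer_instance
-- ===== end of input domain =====

-- B replaces A's sum-of-absolutes / negative-count / min-abs arithmetic with a two-state
-- dynamic program over sign choices ('even'/'odd' = best sum with an even/odd number of
-- flips so far); the even-parity optimum is the answer. Objective: alternative.

-- ===== PORT A =====
-- one step of A's inner loop body on the state (total_abs, min_abs, neg_count, has_zero)
def stepA (s : Int × Int × Int × Bool) (x : Int) : Int × Int × Int × Bool :=
  let z := if x == 0 then true else s.2.2.2
  let n := if x < 0 then s.2.2.1 + 1 else s.2.2.1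
  let ax := if x < 0 then -x else x
  let t := s.1 + ax
  let m := if ax < s.2.1 then ax else s.2.1
  (t, m, n, z)

def maximumMatrixSum (matrix : List (List Int)) : Int :=
  let s := matrix.foldl (fun s row => row.foldl stepA s) (0, 10 ^ 18, 0, false)
  if s.2.2.2 then s.1
  else if s.2.2.1 % 2 == 0 then s.1
  else s.1 - 2 * s.2.1

-- ===== PORT B =====
-- one step of B's inner loop: 'even'/'odd' = best sum with an even/odd number of flips so far
def stepB (s : Int × Option Int) (x : Int) : Int × Option Int :=
  match s.2 with
  | none => (s.1 + x, some (s.1 - x))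
  | some d => (max (s.1 + x) (d - x), max (s.1 - x) (d + x))

def maximumMatrixSum_alt (matrix : List (List Int)) : Int :=
  (matrix.foldl (fun s row => row.foldl stepB s) (0, none)).1

-- ===== PRECONDITION & SPEC =====
def Spec_maximumMatrixSum (matrix : List (List Int)) (out : Int) : Prop := out = maximumMatrixSum_alt matrix
instance (matrix : List (List Int)) (out : Int) : Decidable (Spec_maximumMatrixSum matrix out) := by unfold Spec_maximumMatrixSum; infer_instance

-- ===== CLAIM (what is proved, stated in full; the proofs are below) =====
def Claim_equal_maximumMatrixSum : Prop := ∀ (matrix : List (List Int)), Dom_maximumMatrixSum matrix → Spec_maximumMatrixSum matrix (maximumMatrixSum matrix)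

-- ===== LEMMAS AND PROOFS =====

-- statistics of the flattened element list
def sAbs (xs : List Int) : Int := (xs.map (fun x => |x|)).sum
def negCnt (xs : List Int) : Int := ((xs.filter (fun x => x < 0)).length : Int)
def mA (xs : List Int) : Int := (xs.map (fun x => |x|)).foldl min (10 ^ 18)

theorem sAbs_append (l : List Int) (x : Int) : sAbs (l ++ [x]) = sAbs l + |x| := by
  simp [sAbs]

theorem negCnt_append (l : List Int) (x : Int) :
    negCnt (l ++ [x]) = negCnt l + (if x < 0 then 1 else 0) := by
  by_cases h : x < 0 <;> simp [negCnt, List.filter_append, h]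

theorem mA_append (l : List Int) (x : Int) : mA (l ++ [x]) = min (mA l) |x| := by
  simp [mA, List.foldl_append]

theorem mA_nonneg (l : List Int) : 0 ≤ mA l := by
  induction l using List.reverseRecOn with
  | nil => simp [mA]
  | append_singleton l x ih =>
    rw [mA_append]
    exact le_min ih (abs_nonneg x)

theorem mA_le_mem (l : List Int) (x : Int) (hx : x ∈ l) : mA l ≤ |x| := by
  induction l using List.reverseRecOn with
  | nil => simp at hx
  | append_singleton l y ih =>
    rw [mA_append]
    rcases List.mem_append.1 hx with h | h
    · exact le_trans (min_le_left _ _) (ih h)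
    · simp at h; subst h; exact min_le_right _ _

-- A's inner loop characterised: the four accumulators are four independent reductions
theorem stepA_foldl (xs : List Int) (t m n : Int) (z : Bool) :
    xs.foldl stepA (t, m, n, z) =
      (t + sAbs xs,
       (xs.map (fun x => |x|)).foldl (fun a b => if b < a then b else a) m,
       n + negCnt xs,
       z || xs.any (fun x => x == 0)) := by
  induction xs generalizing t m n z with
  | nil => simp [sAbs, negCnt]
  | cons x xs ih =>
    simp only [List.foldl_cons, stepA, List.map_cons, List.any_cons]
    rw [ih]
    refine Prod.ext ?_ (Prod.ext ?_ (Prod.ext ?_ ?_)) <;> simp only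
    · have : (if x < 0 then -x else x) = |x| := by
        rcases lt_or_ge x 0 with h | h
        · simp [abs_of_neg, h]
        · simp [abs_of_nonneg, h, not_lt.2 h]
      rw [this]
      simp [sAbs, add_assoc]
    · congr 1
      rcases lt_or_ge x 0 with h | h
      · simp [abs_of_neg, h]
      · simp [abs_of_nonneg, h, not_lt.2 h]
    · by_cases h : x < 0 <;> simp [negCnt, h, add_assoc, add_comm]
    · by_cases h : x = 0
      · simp [h]
      · have hx : (x == 0) = false := by simp [h]
        rw [hx]
        simp

theorem minbody_eq_min : (fun a b : Int => if b < a then b else a) = min := by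
  funext a b
  rcases lt_or_ge b a with h | h <;> simp [min_def] <;> omega

-- B's loop characterised: the two DP states are the two parity optima
theorem stepB_foldl (xs : List Int) (hne : xs ≠ [])
    (hb : ∀ y ∈ xs, |y| ≤ 10 ^ 18) :
    xs.foldl stepB (0, none) =
      (sAbs xs - (if negCnt xs % 2 = 0 then 0 else 2 * mA xs),
       some (sAbs xs - (if negCnt xs % 2 = 0 then 2 * mA xs else 0))) := by
  induction xs using List.reverseRecOn with
  | nil => exact absurd rfl hne
  | append_singleton l x ih =>
    rw [List.foldl_append]
    have hbx : |x| ≤ (10:Int) ^ 18 := hb x (by simp)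
    rcases eq_or_ne l [] with hl | hl
    · subst hl
      simp only [List.nil_append, List.foldl_nil, List.foldl_cons, List.foldl_nil, stepB]
      have hS : sAbs [x] = |x| := by simp [sAbs]
      have hM : mA [x] = |x| := by
        simp only [mA, List.map_cons, List.map_nil, List.foldl_cons, List.foldl_nil]
        exact min_eq_right hbx
      have hC : negCnt [x] = if x < 0 then 1 else 0 := by
        by_cases h : x < 0 <;> simp [negCnt, h]
      rw [hS, hM, hC]
      rcases lt_or_ge x 0 with h | h
      · rw [if_pos h, abs_of_neg h, if_neg (by decide : ¬ ((1:Int) % 2 = 0)),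
          if_neg (by decide : ¬ ((1:Int) % 2 = 0))]
        refine Prod.ext ?_ (congrArg some ?_) <;> dsimp only <;> omega
      · rw [if_neg (not_lt.2 h), abs_of_nonneg h, if_pos (by decide : (0:Int) % 2 = 0),
          if_pos (by decide : (0:Int) % 2 = 0)]
        refine Prod.ext ?_ (congrArg some ?_) <;> dsimp only <;> omega
    · have hbl : ∀ y ∈ l, |y| ≤ 10 ^ 18 := fun y hy => hb y (by simp [hy])
      rw [ih hl hbl]
      simp only [List.foldl_cons, List.foldl_nil, stepB, sAbs_append, negCnt_append, mA_append]
      set S := sAbs l with hSdef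
      set M := mA l with hMdef
      set c := negCnt l with hcdef
      have hM0 : 0 ≤ M := mA_nonneg l
      have ha0 : 0 ≤ |x| := abs_nonneg x
      set a := |x| with hadef
      refine Prod.ext ?_ ?_ <;> dsimp only
      · by_cases hpar : c % 2 = 0 <;> by_cases hx : x < 0
        · -- even, x < 0 : parity flips to odd
          have h1 : (c + 1) % 2 ≠ 0 := by omega
          have hax : a = -x := abs_of_neg hx
          rw [if_pos hx, if_pos hpar, if_pos hpar, if_neg h1]
          simp only [max_def, min_def]
          split_ifs <;> omega
        · have hax : a = x := abs_of_nonneg (not_lt.1 hx)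
          rw [if_neg hx, if_pos hpar, if_pos hpar, if_pos (by omega : (c + 0) % 2 = 0)]
          simp only [max_def]
          split_ifs <;> omega
        · have h1 : (c + 1) % 2 = 0 := by omega
          have hax : a = -x := abs_of_neg hx
          rw [if_pos hx, if_neg hpar, if_neg hpar, if_pos h1]
          simp only [max_def]
          split_ifs <;> omega
        · have hax : a = x := abs_of_nonneg (not_lt.1 hx)
          rw [if_neg hx, if_neg hpar, if_neg hpar, if_neg (by omega : ¬ (c + 0) % 2 = 0)]
          simp only [max_def, min_def]
          split_ifs <;> omega
      · refine congrArg some ?_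
        by_cases hpar : c % 2 = 0 <;> by_cases hx : x < 0
        · have h1 : (c + 1) % 2 ≠ 0 := by omega
          have hax : a = -x := abs_of_neg hx
          rw [if_pos hx, if_pos hpar, if_pos hpar, if_neg h1]
          simp only [max_def]
          split_ifs <;> omega
        · have hax : a = x := abs_of_nonneg (not_lt.1 hx)
          rw [if_neg hx, if_pos hpar, if_pos hpar, if_pos (by omega : (c + 0) % 2 = 0)]
          simp only [max_def, min_def]
          split_ifs <;> omega
        · have h1 : (c + 1) % 2 = 0 := by omega
          have hax : a = -x := abs_of_neg hx
          rw [if_pos hx, if_neg hpar, if_neg hpar, if_pos h1]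
          simp only [max_def, min_def]
          split_ifs <;> omega
        · have hax : a = x := abs_of_nonneg (not_lt.1 hx)
          rw [if_neg hx, if_neg hpar, if_neg hpar, if_neg (by omega : ¬ (c + 0) % 2 = 0)]
          simp only [max_def]
          split_ifs <;> omega

theorem mA_of_zero (xs : List Int) (hz : (0:Int) ∈ xs) : mA xs = 0 :=
  le_antisymm (by simpa using mA_le_mem xs 0 hz) (mA_nonneg xs)

-- ===== VERDICT (by name: the statement is the Claim_ definition above) =====
theorem maximumMatrixSum_spec : Claim_equal_maximumMatrixSum := by
  intro matrix hdom
  unfold Spec_maximumMatrixSum maximumMatrixSum maximumMatrixSum_alt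
  have hflatA : matrix.foldl (fun s row => row.foldl stepA s) (0, 10 ^ 18, 0, false)
      = (matrix.flatten).foldl stepA (0, 10 ^ 18, 0, false) := List.foldl_flatten.symm
  have hflatB : matrix.foldl (fun s row => row.foldl stepB s) (0, none)
      = (matrix.flatten).foldl stepB (0, none) := List.foldl_flatten.symm
  rw [hflatA, hflatB]
  set xs := matrix.flatten with hxs
  have hbound : ∀ y ∈ xs, |y| ≤ 10 ^ 18 := by
    intro y hy
    rw [hxs, List.mem_flatten] at hy
    obtain ⟨row, hrow, hyr⟩ := hy
    unfold Dom_maximumMatrixSum at hdom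
    simp only [List.all_eq_true, pvDomInt, decide_eq_true_eq] at hdom
    have := hdom row hrow y hyr
    have : |y| ≤ 2147483648 := abs_le.2 ⟨this.1, this.2⟩
    omega
  rcases eq_or_ne xs [] with hnil | hne
  · rw [hnil]
    simp
  · rw [stepA_foldl, stepB_foldl xs hne hbound, minbody_eq_min]
    simp only [zero_add]
    have hmin : (xs.map (fun x => |x|)).foldl min (10 ^ 18) = mA xs := rfl
    rw [hmin]
    by_cases hpar : negCnt xs % 2 = 0
    · simp [hpar]
    · by_cases hz : xs.any (fun x => x == 0)
      · have h0 : (0:Int) ∈ xs := by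
          simp only [List.any_eq_true, beq_iff_eq] at hz
          obtain ⟨y, hy, rfl⟩ := hz
          exact hy
        simp [hz, hpar, mA_of_zero xs h0]
      · simp [hz, hpar]
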